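-- pv_equiv track=rewrite | github.com/JrClap/SeminarPython | Seminar_5/Task_2.py | sort_number
-- ===== SOURCE A (Python) =====
-- def sort_number (lists):
--     lst = []
--     for i in range(len(lists)):
--         temp = lists[i]
--         cortez_lst = [temp]
--         for j in range(i + 1, len(lists)):
--             if lists[j] > temp:
--                 temp = lists[j]
--                 cortez_lst.append(temp)
--         if len(cortez_lst) > 1:
--             lst.append(cortez_lst)
--     return lst
-- ===== SOURCE B (Python) =====
-- def sort_number(lists):
--     # Monotonic stack of (value, chain) pairs, scanning right-to-left:
--     # after popping every entry with value <= v, the top entry's chain is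
--     # exactly v's rightward record-maxima continuation.
--     stack = []
--     chains = []
--     for v in reversed(lists):
--         while stack and stack[-1][0] <= v:
--             stack.pop()
--         chain = [v] + (stack[-1][1] if stack else [])
--         stack.append((v, chain))
--         chains.append(chain)
--     chains.reverse()
--     return [c for c in chains if len(c) > 1]
-- ===== Notes on version B (the rewrite author's own statement) =====
-- stated objective: alternative
-- what changed: Replaced A's per-index rightward rescan (nested index loops) by a single right-to-left monotonic-stack pass that looks up each chain's continuation at the stack top instead of rescanning the suffix.
import Mathlib
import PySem

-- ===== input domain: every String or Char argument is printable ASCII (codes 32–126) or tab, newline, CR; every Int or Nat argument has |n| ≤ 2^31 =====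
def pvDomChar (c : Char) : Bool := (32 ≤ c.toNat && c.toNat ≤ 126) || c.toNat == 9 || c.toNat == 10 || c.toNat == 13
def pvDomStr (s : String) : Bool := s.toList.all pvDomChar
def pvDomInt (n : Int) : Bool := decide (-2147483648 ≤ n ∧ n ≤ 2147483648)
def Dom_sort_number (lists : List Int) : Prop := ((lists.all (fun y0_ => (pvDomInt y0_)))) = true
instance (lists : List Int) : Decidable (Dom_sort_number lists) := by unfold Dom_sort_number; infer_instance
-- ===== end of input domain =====

-- B replaces A's per-index rightward rescan by one right-to-left monotonic-stack pass
-- that shares chain tails (objective: alternative algorithm; return value proved identical).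

-- ===== PORT A =====
-- A: for each i, walk j = i+1..n-1 keeping the running maximum; collect chains of length > 1.
-- (indices produced by pyRange are always in range, so pyGetD's default is never used)
def sort_number (lists : List Int) : List (List Int) :=
  (PySem.List.pyRange 0 lists.length 1).foldl (fun lst i =>
    let temp := PySem.List.pyGetD lists i 0
    let cortez_lst : List Int := [temp]
    let st := (PySem.List.pyRange (i + 1) lists.length 1).foldl
      (fun (st : Int × List Int) j =>
        let x := PySem.List.pyGetD lists j 0
        if x > st.1 then (x, st.2 ++ [x]) else st) (temp, cortez_lst)
    if st.2.length > 1 then lst ++ [st.2] else lst) []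

-- ===== PORT B =====
-- B: one pass over reversed(lists) maintaining a stack of (value, chain) pairs (head = top).
-- stepB is the loop body of B's single pass (pop while top value ≤ v, share the top chain).
def stepB (st : List (Int × List Int) × List (List Int)) (v : Int) :
    List (Int × List Int) × List (List Int) :=
  let stack := st.1.dropWhile (fun p => p.1 ≤ v)
  let chain := v :: (match stack with | [] => [] | (_, c) :: _ => c)
  ((v, chain) :: stack, st.2 ++ [chain])

def sort_number_alt (lists : List Int) : List (List Int) :=
  ((lists.reverse.foldl stepB ([], [])).2.reverse).filter (fun c => c.length > 1)

-- ===== PRECONDITION & SPEC =====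
def Spec_sort_number (lists : List Int) (out : List (List Int)) : Prop := out = sort_number_alt lists
instance (lists : List Int) (out : List (List Int)) : Decidable (Spec_sort_number lists out) := by unfold Spec_sort_number; infer_instance

-- ===== CLAIM (what is proved, stated in full; the proofs are below) =====
def Claim_equal_sort_number : Prop := ∀ (lists : List Int), Dom_sort_number lists → Spec_sort_number lists (sort_number lists)

-- ===== LEMMAS AND PROOFS =====

-- Reference semantics: rightward record maxima after a running maximum v.
def recordMax : Int → List Int → List Int
  | _, [] => []
  | v, x :: xs => if x > v then x :: recordMax x xs else recordMax v xs

-- All chains, one per starting index, in left-to-right order.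
def chainsOf : List Int → List (List Int)
  | [] => []
  | v :: rest => (v :: recordMax v rest) :: chainsOf rest

-- ---- A-side ----

def innerF (lists : List Int) : Int × List Int → Int → Int × List Int :=
  fun st j =>
    let x := PySem.List.pyGetD lists j 0
    if x > st.1 then (x, st.2 ++ [x]) else st

def auxA : List Int → Int → List Int → Int × List Int
  | [], temp, c => (temp, c)
  | x :: xs, temp, c => if x > temp then auxA xs x (c ++ [x]) else auxA xs temp c

theorem inner_eq_auxA (lists : List Int) :
    ∀ (k : Nat) (temp : Int) (c : List Int), k ≤ lists.length →
      (PySem.List.pyRange (k : Int) lists.length 1).foldl (innerF lists) (temp, c)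
        = auxA (lists.drop k) temp c := by
  intro k
  induction hn : lists.length - k generalizing k with
  | zero =>
    intro temp c hk
    have hk' : k = lists.length := by omega
    subst hk'
    rw [PySem.List.pyRange_one_eq_nil (by omega)]
    simp [auxA, List.drop_length]
  | succ n ih =>
    intro temp c hk
    have hlt : k < lists.length := by omega
    rw [PySem.List.pyRange_one_cons (by exact_mod_cast hlt)]
    have hdrop : lists.drop k = lists[k] :: lists.drop (k + 1) := by
      rw [List.drop_eq_getElem_cons hlt]
    rw [hdrop]
    have hget : PySem.List.pyGetD lists (k : Int) 0 = lists[k] := by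
      simpa using PySem.List.pyGetD_ofNat (h := hlt) (d := (0 : Int))
    simp only [List.foldl_cons, innerF, hget]
    have hcast : ((k : Int) + 1) = ((k + 1 : Nat) : Int) := by push_cast; ring
    by_cases h : lists[k] > temp
    · simp only [if_pos h, auxA, hcast]
      exact ih (k + 1) (by omega) lists[k] (c ++ [lists[k]]) (by omega)
    · simp only [if_neg h, auxA, hcast]
      exact ih (k + 1) (by omega) temp c (by omega)

theorem auxA_snd : ∀ (xs : List Int) (temp : Int) (c : List Int),
    (auxA xs temp c).2 = c ++ recordMax temp xs := by
  intro xs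
  induction xs with
  | nil => intro temp c; simp [auxA, recordMax]
  | cons x xs ih =>
    intro temp c
    by_cases h : x > temp
    · simp [auxA, recordMax, if_pos h, ih, List.append_assoc]
    · simp [auxA, recordMax, if_neg h, ih]

def outerF (lists : List Int) : List (List Int) → Int → List (List Int) :=
  fun lst i =>
    let temp := PySem.List.pyGetD lists i 0
    let cortez_lst : List Int := [temp]
    let st := (PySem.List.pyRange (i + 1) lists.length 1).foldl (innerF lists) (temp, cortez_lst)
    if st.2.length > 1 then lst ++ [st.2] else lst

theorem outer_eq (lists : List Int) :
    ∀ (k : Nat) (acc : List (List Int)), k ≤ lists.length →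
      (PySem.List.pyRange (k : Int) lists.length 1).foldl (outerF lists) acc
        = acc ++ (chainsOf (lists.drop k)).filter (fun c => c.length > 1) := by
  intro k
  induction hn : lists.length - k generalizing k with
  | zero =>
    intro acc hk
    have hk' : k = lists.length := by omega
    subst hk'
    rw [PySem.List.pyRange_one_eq_nil (by omega)]
    simp [chainsOf, List.drop_length]
  | succ n ih =>
    intro acc hk
    have hlt : k < lists.length := by omega
    rw [PySem.List.pyRange_one_cons (by exact_mod_cast hlt)]
    have hget : PySem.List.pyGetD lists (k : Int) 0 = lists[k] := by
      simpa using PySem.List.pyGetD_ofNat (h := hlt) (d := (0 : Int))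
    have hcast : ((k : Int) + 1) = ((k + 1 : Nat) : Int) := by push_cast; ring
    have hinner := inner_eq_auxA lists (k + 1) lists[k] [lists[k]] (by omega)
    have hdrop : lists.drop k = lists[k] :: lists.drop (k + 1) := by
      rw [List.drop_eq_getElem_cons hlt]
    simp only [List.foldl_cons]
    rw [show (outerF lists acc (k : Int)) =
        (if ([lists[k]] ++ recordMax lists[k] (lists.drop (k+1))).length > 1
          then acc ++ [[lists[k]] ++ recordMax lists[k] (lists.drop (k+1))] else acc) by
      simp only [outerF, hget, hcast, hinner, auxA_snd]]
    rw [hcast, ih (k + 1) (by omega) _ (by omega)]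
    rw [hdrop]
    simp only [chainsOf, List.filter_cons, List.singleton_append]
    split_ifs <;> simp_all [List.append_assoc]

theorem sort_number_eq (lists : List Int) :
    sort_number lists = (chainsOf lists).filter (fun c => c.length > 1) := by
  have h := outer_eq lists 0 [] (by omega)
  simpa [sort_number, outerF, innerF] using h

-- ---- B-side ----

def topChain : List (Int × List Int) → List Int
  | [] => []
  | (_, c) :: _ => c

def StkInv (st : List (Int × List Int)) (s : List Int) : Prop :=
  ∀ v, topChain (st.dropWhile (fun p => p.1 ≤ v)) = recordMax v s

theorem dropWhile_dropWhile {α : Type} (p q : α → Bool) (l : List α)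
    (h : ∀ x, q x = true → p x = true) :
    (l.dropWhile q).dropWhile p = l.dropWhile p := by
  induction l with
  | nil => rfl
  | cons x xs ih =>
    by_cases hq : q x = true
    · rw [List.dropWhile_cons_of_pos hq, ih, List.dropWhile_cons_of_pos (h x hq)]
    · rw [List.dropWhile_cons_of_neg hq]

theorem foldr_stepB (l : List Int) :
    StkInv (l.foldr (fun v st => stepB st v) ([], [])).1 l ∧
    (l.foldr (fun v st => stepB st v) ([], [])).2 = (chainsOf l).reverse := by
  induction l with
  | nil =>
    constructor
    · intro v; simp [recordMax, topChain]
    · simp [chainsOf]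
  | cons v rest ih =>
    obtain ⟨hinv, hch⟩ := ih
    set r := rest.foldr (fun v st => stepB st v) ([], []) with hr
    have htop : topChain (r.1.dropWhile (fun p => p.1 ≤ v)) = recordMax v rest := hinv v
    have hstep : (v :: rest).foldr (fun v st => stepB st v) ([], []) = stepB r v := by
      rw [List.foldr_cons]
    have hmatch :
        (match r.1.dropWhile (fun p => decide (p.1 ≤ v)) with | [] => [] | (_, c) :: _ => c)
          = recordMax v rest := by
      rw [← htop]; cases r.1.dropWhile (fun p => p.1 ≤ v) <;> simp [topChain]
    constructor
    · intro w
      rw [hstep]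
      simp only [stepB]
      by_cases hvw : v ≤ w
      · rw [List.dropWhile_cons_of_pos (by simpa using hvw)]
        rw [dropWhile_dropWhile _ _ _ (fun p hp => by
          simp only [decide_eq_true_eq] at *; omega)]
        rw [hinv w]
        simp [recordMax, show ¬ v > w by omega]
      · rw [List.dropWhile_cons_of_neg (by simpa using hvw)]
        simp only [topChain]
        rw [show (recordMax w (v :: rest)) = v :: recordMax v rest by
          simp [recordMax, show v > w by omega]]
        exact congrArg (v :: ·) hmatch
    · rw [hstep]
      simp only [stepB]
      rw [hch, hmatch]
      simp [chainsOf]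

theorem sort_number_alt_eq (lists : List Int) :
    sort_number_alt lists = (chainsOf lists).filter (fun c => c.length > 1) := by
  have h := (foldr_stepB lists).2
  unfold sort_number_alt
  rw [List.foldl_reverse]
  rw [show (fun (x : Int) (y : List (Int × List Int) × List (List Int)) => stepB y x)
      = (fun v st => stepB st v) from rfl]
  rw [h, List.reverse_reverse]

-- ===== VERDICT (by name: the statement is the Claim_ definition above) =====
theorem sort_number_spec : Claim_equal_sort_number := by
  intro lists _
  unfold Spec_sort_number
  rw [sort_number_eq, sort_number_alt_eq]
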